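-- pv_equiv track=rewrite | github.com/sepandhaghighi/pycm | pycm/utils.py | sparse_matrix_calc
-- ===== SOURCE A (Python) =====
-- from typing import Union, List, Dict, Any, Tuple, Callable, Optional
--
-- def sparse_matrix_calc(classes: List[Any], table: Dict[Any, Dict[Any, int]]
--                        ) -> Tuple[Dict[Any, Dict[Any, int]], List[Any], List[Any]]:
--     """
--     Return sparse confusion matrix and its classes.
--
--     :param classes: confusion matrix classes
--     :param table: input confusion matrix
--     """
--     sparse_table = {}
--     for key in table:
--         sparse_table[key] = table[key].copy()
--     predict_classes = classes.copy()
--     actual_classes = classes.copy()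
--     for x in classes:
--         row_sum = 0
--         col_sum = 0
--         for y in classes:
--             row_sum += table[x][y]
--             col_sum += table[y][x]
--         if row_sum == 0:
--             del sparse_table[x]
--             actual_classes.remove(x)
--         if col_sum == 0:
--             for row in actual_classes:
--                 del sparse_table[row][x]
--             predict_classes.remove(x)
--     return sparse_table, actual_classes, predict_classes
-- ===== SOURCE B (Python) =====
-- def sparse_matrix_calc(classes, table):
--     """
--     Return sparse confusion matrix and its classes.
--
--     Built fresh in one pass instead of copy-then-delete: zero rows/columns are
--     determined up front, then the kept classes and the sparse table are built
--     directly (the input table is never mutated).  Rows not listed in classes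
--     are passed through untouched, as in the original.
--     """
--     zero_rows = {x for x in classes if sum(table[x][y] for y in classes) == 0}
--     zero_cols = {x for x in classes if sum(table[y][x] for y in classes) == 0}
--     actual_classes = [x for x in classes if x not in zero_rows]
--     predict_classes = [x for x in classes if x not in zero_cols]
--     class_set = set(classes)
--     sparse_table = {}
--     for r, row in table.items():
--         if r in zero_rows:
--             continue
--         if r in class_set:
--             sparse_table[r] = {c: v for c, v in row.items() if c not in zero_cols}
--         else:
--             sparse_table[r] = dict(row)
--     return sparse_table, actual_classes, predict_classes
-- ===== Notes on version B (the rewrite author's own statement) =====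
-- stated objective: simpler
-- what changed: A copies the table and then destructively deletes zero rows/columns while mutating its class lists inside one interleaved loop; B first computes the zero-row and zero-column class sets from direct sums, derives actual/predict classes as filters, and builds the sparse table fresh in a single non-mutating pass over the table.
import Mathlib
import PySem

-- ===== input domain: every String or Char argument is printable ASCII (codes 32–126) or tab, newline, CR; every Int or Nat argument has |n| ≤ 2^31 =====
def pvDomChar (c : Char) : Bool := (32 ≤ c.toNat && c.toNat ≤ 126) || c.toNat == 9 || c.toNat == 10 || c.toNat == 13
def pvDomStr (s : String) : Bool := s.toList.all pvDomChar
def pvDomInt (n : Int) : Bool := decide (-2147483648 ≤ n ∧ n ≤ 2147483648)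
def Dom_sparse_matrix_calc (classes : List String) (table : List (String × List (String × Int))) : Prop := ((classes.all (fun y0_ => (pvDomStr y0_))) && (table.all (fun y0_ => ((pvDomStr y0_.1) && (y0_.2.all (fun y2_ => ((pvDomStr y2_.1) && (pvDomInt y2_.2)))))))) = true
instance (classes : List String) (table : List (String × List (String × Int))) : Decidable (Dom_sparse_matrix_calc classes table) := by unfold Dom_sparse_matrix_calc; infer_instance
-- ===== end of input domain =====

-- B builds the sparse table fresh from precomputed zero-row/zero-column class sets instead of
-- A's copy-then-delete with in-place mutation of its class lists; proved equal on Pre_.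


-- shared input conversion: the dict-of-dicts the Python function receives
def pvDictT : Type := PySem.Dict String (PySem.Dict String Int)
def pvToDict (table : List (String × List (String × Int))) : pvDictT :=
  PySem.Dict.ofList (table.map (fun p => (p.1, PySem.Dict.ofList p.2)))

-- sum of row x over the class columns / of column x over the class rows (B's generator sums)
def pvRowSum (classes : List String) (tbl : pvDictT) (x : String) : Int :=
  (classes.map (fun y => (tbl.getD x PySem.Dict.empty).getD y 0)).sum
def pvColSum (classes : List String) (tbl : pvDictT) (x : String) : Int :=
  (classes.map (fun y => (tbl.getD y PySem.Dict.empty).getD x 0)).sum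

-- ===== PORT A =====
-- body of A's main 'for x in classes' loop; state = (sparse_table, actual_classes, predict_classes)
def pvBodyA (classes : List String) (tbl : pvDictT)
    (st : pvDictT × List String × List String) (x : String) : pvDictT × List String × List String :=
  let sums := classes.foldl (fun (s : Int × Int) y =>
      (s.1 + (tbl.getD x PySem.Dict.empty).getD y 0,
       s.2 + (tbl.getD y PySem.Dict.empty).getD x 0)) (0, 0)
  let st1 := if sums.1 = 0
    then (st.1.erase x, (PySem.List.remove? st.2.1 x).getD st.2.1, st.2.2)
    else st
  if sums.2 = 0
    then (st1.2.1.foldl (fun sp row => sp.modify row PySem.Dict.empty (fun r => r.erase x)) st1.1,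
          st1.2.1, (PySem.List.remove? st1.2.2 x).getD st1.2.2)
    else st1

def sparse_matrix_calc (classes : List String) (table : List (String × List (String × Int))) : (List (String × List (String × Int))) × List String × List String :=
  let tbl := pvToDict table
  -- sparse_table = {key: table[key].copy() for key in table}
  let sparse0 := tbl.items.foldl (fun sp p => sp.insert p.1 p.2) PySem.Dict.empty
  let st := classes.foldl (pvBodyA classes tbl) (sparse0, classes, classes)
  (st.1.items.map (fun p => (p.1, p.2.items)), st.2.1, st.2.2)

-- ===== PORT B =====
def sparse_matrix_calc_alt (classes : List String) (table : List (String × List (String × Int))) : (List (String × List (String × Int))) × List String × List String :=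
  let tbl := pvToDict table
  let zeroRows := PySem.Set.ofList (classes.filter (fun x => pvRowSum classes tbl x == 0))
  let zeroCols := PySem.Set.ofList (classes.filter (fun x => pvColSum classes tbl x == 0))
  let actual := classes.filter (fun x => !zeroRows.contains x)
  let predict := classes.filter (fun x => !zeroCols.contains x)
  let classSet := PySem.Set.ofList classes
  let sparse := tbl.items.foldl (fun sp p =>
      if zeroRows.contains p.1 then sp
      else sp.insert p.1 (if classSet.contains p.1
        then PySem.Dict.ofList (p.2.items.filter (fun q => !zeroCols.contains q.1))
        else p.2)) PySem.Dict.empty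
  (sparse.items.map (fun p => (p.1, p.2.items)), actual, predict)

-- ===== PRECONDITION & SPEC =====
-- Pre_ excludes exactly the inputs on which A raises: a class missing from the table dict or from
-- some class row (KeyError), and duplicated classes whose row or column sum is zero (A then
-- dels/removes an already-deleted entry at the duplicate occurrence: KeyError).
def Pre_sparse_matrix_calc (classes : List String) (table : List (String × List (String × Int))) : Prop :=
  (∀ x ∈ classes, (pvToDict table).contains x = true ∧
      ∀ y ∈ classes, ((pvToDict table).getD x PySem.Dict.empty).contains y = true)
  ∧ ∀ x ∈ classes, 1 < classes.count x →
      pvRowSum classes (pvToDict table) x ≠ 0 ∧ pvColSum classes (pvToDict table) x ≠ 0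
instance (classes : List String) (table : List (String × List (String × Int))) : Decidable (Pre_sparse_matrix_calc classes table) := by unfold Pre_sparse_matrix_calc; infer_instance

def pvWitness_sparse_matrix_calc : List String × (List (String × List (String × Int))) :=
  (["a", "b"], [("a", [("a", 1), ("b", 0)]), ("b", [("a", 0), ("b", 0)])])

def Spec_sparse_matrix_calc (classes : List String) (table : List (String × List (String × Int))) (out : (List (String × List (String × Int))) × List String × List String) : Prop := out = sparse_matrix_calc_alt classes table
instance (classes : List String) (table : List (String × List (String × Int))) (out : (List (String × List (String × Int))) × List String × List String) : Decidable (Spec_sparse_matrix_calc classes table out) := by unfold Spec_sparse_matrix_calc; infer_instance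

-- ===== CLAIM (what is proved, stated in full; the proofs are below) =====
def Claim_equal_sparse_matrix_calc : Prop := ∀ (classes : List String) (table : List (String × List (String × Int))), Dom_sparse_matrix_calc classes table → Pre_sparse_matrix_calc classes table → Spec_sparse_matrix_calc classes table (sparse_matrix_calc classes table)

-- ===== LEMMAS AND PROOFS =====

-- closed forms for A's loop state after processing a prefix P of classes
def pvKeepR (classes : List String) (tbl : pvDictT) (P : List String) (c : String) : Bool :=
  !(decide (c ∈ P) && decide (pvRowSum classes tbl c = 0))
def pvKeepC (classes : List String) (tbl : pvDictT) (P : List String) (c : String) : Bool :=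
  !(decide (c ∈ P) && decide (pvColSum classes tbl c = 0))
def pvRowOf (classes : List String) (tbl : pvDictT) (P : List String) (p : String × PySem.Dict String Int) : String × PySem.Dict String Int :=
  (p.1, if p.1 ∈ classes then PySem.Dict.mk (p.2.items.filter (fun q => pvKeepC classes tbl P q.1)) else p.2)
def pvSpAt (classes : List String) (tbl : pvDictT) (P : List String) : pvDictT :=
  PySem.Dict.mk ((tbl.items.filter (fun p => pvKeepR classes tbl P p.1)).map (pvRowOf classes tbl P))

theorem pvPairFold (l : List String) (f g : String → Int) (a b : Int) :
    l.foldl (fun (s : Int × Int) y => (s.1 + f y, s.2 + g y)) (a, b)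
      = (a + (l.map f).sum, b + (l.map g).sum) := by
  induction l generalizing a b with
  | nil => simp
  | cons h t ih => simp [List.foldl_cons, ih, add_assoc]
theorem pvKeepAux_ne (S : String → Int) (P : List String) (x : String) (h : S x ≠ 0) (c : String) :
    (!(decide (c ∈ P ++ [x]) && decide (S c = 0))) = (!(decide (c ∈ P) && decide (S c = 0))) := by
  by_cases hc : c = x
  · subst hc; simp [h]
  · simp [List.mem_append, hc]
theorem pvKeepAux_zero (S : String → Int) (P : List String) (x : String) (h : S x = 0) (c : String) :
    (!(decide (c ∈ P ++ [x]) && decide (S c = 0)))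
      = ((!(decide (c ∈ P) && decide (S c = 0))) && !(c == x)) := by
  by_cases hc : c = x
  · subst hc; simp [h]
  · simp [List.mem_append, hc]
theorem pvCountOne (classes P rest' : List String) (x : String) (h : classes = P ++ x :: rest')
    (hc : classes.count x ≤ 1) : x ∉ P ∧ x ∉ rest' ∧ classes.count x = 1 := by
  subst h
  simp only [List.count_append, List.count_cons_self] at hc
  have hp := List.count_pos_iff (a := x) (l := P)
  have hr := List.count_pos_iff (a := x) (l := rest')
  refine ⟨fun hm => by have := hp.mpr hm; omega, fun hm => by have := hr.mpr hm; omega, ?_⟩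
  simp only [List.count_append, List.count_cons_self]; omega
theorem pvFilterErase (l : List String) (p : String → Bool) (x : String) (h : l.count x ≤ 1) :
    (l.filter p).erase x = l.filter (fun c => p c && !(c == x)) := by
  induction l with
  | nil => simp
  | cons a t ih =>
    by_cases hax : a = x
    · subst hax
      have hx : t.count a = 0 := by
        have : List.count a (a :: t) = t.count a + 1 := List.count_cons_self ..
        omega
      have hxt : a ∉ t := by simpa using List.count_eq_zero.mp hx
      have hfc : List.filter p t = List.filter (fun c => p c && !(c == a)) t :=
        List.filter_congr (fun c hc => by
          have hca : c ≠ a := fun e => hxt (e ▸ hc)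
          simp [hca])
      by_cases hp : p a = true
      · simp [hp, List.erase_cons_head, hfc]
      · have hp' : p a = false := by simpa using hp
        simp [hp', hfc]
    · have hc : t.count x ≤ 1 := by
        simp [List.count_cons] at h; omega
      by_cases hp : p a = true
      · simp [hp, hax, ih hc, beq_iff_eq]
      · have hp' : p a = false := by simpa using hp
        simp [hp', ih hc]
theorem pvContainsMk {ν : Type} (acc : List (String × ν)) (k : String) :
    (PySem.Dict.mk acc).contains k = decide (k ∈ acc.map (·.1)) := by
  rw [PySem.Dict.contains_eq_decide_mem_keys]
  simp [PySem.Dict.keys]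
theorem pvEraseErase (d : PySem.Dict String Int) (x : String) :
    (d.erase x).erase x = d.erase x := by
  simp [PySem.Dict.erase, List.filter_filter]
theorem pvFoldModify (l : List String) (x : String) :
    ∀ (d : PySem.Dict String (PySem.Dict String Int)), d.keys.Nodup →
    (∀ r ∈ l, d.contains r = true) →
    (l.foldl (fun sp row => sp.modify row PySem.Dict.empty (fun r => r.erase x)) d)
      = PySem.Dict.mk (d.items.map (fun p => if p.1 ∈ l then (p.1, p.2.erase x) else p)) := by
  induction l with
  | nil =>
    intro d _ _
    simp only [List.foldl_nil, List.not_mem_nil, if_neg (fun h => h)]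
    cases d with
    | mk items => simp
  | cons r t ih =>
    intro d hnd hcont
    have hr : d.contains r = true := hcont r (by simp)
    have hd' : (d.modify r PySem.Dict.empty (fun row => row.erase x)).items
        = d.items.map (fun p => if (p.1 == r) = true then (r, (d.getD r PySem.Dict.empty).erase x) else p) := by
      simp only [PySem.Dict.modify]
      exact PySem.Dict.items_insert_of_contains d _ hr
    have hkeys' : (d.modify r PySem.Dict.empty (fun row => row.erase x)).keys = d.keys := by
      simp only [PySem.Dict.keys, hd']
      rw [List.map_map]
      apply List.map_congr_left
      intro p hp
      by_cases h : p.1 = r <;> simp [h]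
    have hnd' : (d.modify r PySem.Dict.empty (fun row => row.erase x)).keys.Nodup := by
      rw [hkeys']; exact hnd
    have hcont' : ∀ s ∈ t, (d.modify r PySem.Dict.empty (fun row => row.erase x)).contains s = true := by
      intro s hs
      rw [PySem.Dict.contains_modify]
      simp [hcont s (List.mem_cons_of_mem _ hs)]
    rw [List.foldl_cons, ih _ hnd' hcont', hd', List.map_map]
    congr 1
    apply List.map_congr_left
    intro p hp
    by_cases h : p.1 = r
    · have hv : d.getD r PySem.Dict.empty = p.2 := by
        have : (r, p.2) ∈ d.items := by
          have := hp; rw [← h] at *; exact (by simpa [Prod.ext_iff] using hp)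
        exact PySem.Dict.getD_of_mem_items d this hnd _
      by_cases ht : r ∈ t <;> simp [Function.comp, h, hv, ht, pvEraseErase]
    · by_cases ht : p.1 ∈ t <;> simp [Function.comp, h, ht]


theorem pvKeepRNe (classes : List String) (tbl : pvDictT) (P : List String) (x : String)
    (h : pvRowSum classes tbl x ≠ 0) :
    pvKeepR classes tbl (P ++ [x]) = pvKeepR classes tbl P :=
  funext fun c => pvKeepAux_ne (pvRowSum classes tbl) P x h c

theorem pvKeepCNe (classes : List String) (tbl : pvDictT) (P : List String) (x : String)
    (h : pvColSum classes tbl x ≠ 0) :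
    pvKeepC classes tbl (P ++ [x]) = pvKeepC classes tbl P :=
  funext fun c => pvKeepAux_ne (pvColSum classes tbl) P x h c

theorem pvRowOfNe (classes : List String) (tbl : pvDictT) (P : List String) (x : String)
    (h : pvColSum classes tbl x ≠ 0) :
    pvRowOf classes tbl (P ++ [x]) = pvRowOf classes tbl P := by
  funext p
  simp only [pvRowOf, pvKeepCNe classes tbl P x h]

theorem pvSpErase (classes : List String) (tbl : pvDictT) (P : List String) (x : String)
    (hRS : pvRowSum classes tbl x = 0) :
    (pvSpAt classes tbl P).erase x
      = PySem.Dict.mk ((tbl.items.filter (fun p => pvKeepR classes tbl (P ++ [x]) p.1)).map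
          (pvRowOf classes tbl P)) := by
  apply PySem.Dict.ext
  show ((tbl.items.filter (fun p => pvKeepR classes tbl P p.1)).map (pvRowOf classes tbl P)).filter
      (fun p => !(p.1 == x)) = _
  rw [List.filter_map, List.filter_filter]
  congr 1
  apply List.filter_congr
  intro p _
  show (((fun p => !(p.1 == x)) ∘ pvRowOf classes tbl P) p && pvKeepR classes tbl P p.1)
      = pvKeepR classes tbl (P ++ [x]) p.1
  have h1 : ((fun p => !(p.1 == x)) ∘ pvRowOf classes tbl P) p = !(p.1 == x) := rfl
  rw [h1, pvKeepR, pvKeepR, pvKeepAux_zero (pvRowSum classes tbl) P x hRS p.1, Bool.and_comm]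

theorem pvRowErase (classes : List String) (tbl : pvDictT) (P : List String) (x : String)
    (hCS : pvColSum classes tbl x = 0) (its : List (String × Int)) :
    (PySem.Dict.mk (its.filter (fun q => pvKeepC classes tbl P q.1))).erase x
      = PySem.Dict.mk (its.filter (fun q => pvKeepC classes tbl (P ++ [x]) q.1)) := by
  apply PySem.Dict.ext
  show (its.filter (fun q => pvKeepC classes tbl P q.1)).filter (fun q => !(q.1 == x)) = _
  rw [List.filter_filter]
  apply List.filter_congr
  intro q _
  rw [pvKeepC, pvKeepC, pvKeepAux_zero (pvColSum classes tbl) P x hCS q.1, Bool.and_comm]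

theorem pvColStep (classes : List String) (tbl : pvDictT)
    (hnd : tbl.keys.Nodup)
    (hKmem : ∀ r ∈ classes, r ∈ tbl.keys)
    (P : List String) (x : String) (hCS : pvColSum classes tbl x = 0) :
    (classes.filter (pvKeepR classes tbl (P ++ [x]))).foldl
        (fun sp row => sp.modify row PySem.Dict.empty (fun r => r.erase x))
        (PySem.Dict.mk ((tbl.items.filter (fun p => pvKeepR classes tbl (P ++ [x]) p.1)).map
          (pvRowOf classes tbl P)))
      = pvSpAt classes tbl (P ++ [x]) := by
  have hkeys : (PySem.Dict.mk ((tbl.items.filter (fun p => pvKeepR classes tbl (P ++ [x]) p.1)).map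
      (pvRowOf classes tbl P))).keys = (tbl.items.filter (fun p => pvKeepR classes tbl (P ++ [x]) p.1)).map (·.1) := by
    simp only [PySem.Dict.keys, List.map_map]
    apply List.map_congr_left
    intro p _
    rfl
  have hndMid : (PySem.Dict.mk ((tbl.items.filter (fun p => pvKeepR classes tbl (P ++ [x]) p.1)).map
      (pvRowOf classes tbl P))).keys.Nodup := by
    rw [hkeys]
    exact ((List.filter_sublist).map _).nodup hnd
  have hcont : ∀ r ∈ classes.filter (pvKeepR classes tbl (P ++ [x])),
      (PySem.Dict.mk ((tbl.items.filter (fun p => pvKeepR classes tbl (P ++ [x]) p.1)).map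
        (pvRowOf classes tbl P))).contains r = true := by
    intro r hr
    obtain ⟨hrc, hrk⟩ := List.mem_filter.mp hr
    rw [pvContainsMk]
    apply decide_eq_true
    rw [show ((tbl.items.filter (fun p => pvKeepR classes tbl (P ++ [x]) p.1)).map (pvRowOf classes tbl P)).map (·.1)
        = (PySem.Dict.mk ((tbl.items.filter (fun p => pvKeepR classes tbl (P ++ [x]) p.1)).map (pvRowOf classes tbl P))).keys from rfl, hkeys]
    obtain ⟨q, hq, hq1⟩ := List.mem_map.mp (hKmem r hrc)
    exact List.mem_map.mpr ⟨q, List.mem_filter.mpr ⟨hq, by rw [show q.1 = r from hq1, hrk]⟩, hq1⟩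
  rw [pvFoldModify _ x _ hndMid hcont]
  apply PySem.Dict.ext
  show ((tbl.items.filter (fun p => pvKeepR classes tbl (P ++ [x]) p.1)).map (pvRowOf classes tbl P)).map _
      = (tbl.items.filter (fun p => pvKeepR classes tbl (P ++ [x]) p.1)).map (pvRowOf classes tbl (P ++ [x]))
  rw [List.map_map]
  apply List.map_congr_left
  intro p hp
  obtain ⟨hpt, hkeep⟩ := List.mem_filter.mp hp
  by_cases hpc : p.1 ∈ classes
  · have hmemAct : p.1 ∈ classes.filter (pvKeepR classes tbl (P ++ [x])) :=
      List.mem_filter.mpr ⟨hpc, hkeep⟩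
    show (if (pvRowOf classes tbl P p).1 ∈ _ then ((pvRowOf classes tbl P p).1, (pvRowOf classes tbl P p).2.erase x) else pvRowOf classes tbl P p) = _
    rw [show (pvRowOf classes tbl P p).1 = p.1 from rfl, if_pos hmemAct]
    show (p.1, (if p.1 ∈ classes then PySem.Dict.mk (p.2.items.filter (fun q => pvKeepC classes tbl P q.1)) else p.2).erase x) = _
    rw [if_pos hpc, pvRowErase classes tbl P x hCS, pvRowOf, if_pos hpc]
  · have hnotAct : p.1 ∉ classes.filter (pvKeepR classes tbl (P ++ [x])) := by
      intro h; exact hpc (List.mem_filter.mp h).1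
    show (if (pvRowOf classes tbl P p).1 ∈ _ then ((pvRowOf classes tbl P p).1, (pvRowOf classes tbl P p).2.erase x) else pvRowOf classes tbl P p) = _
    rw [show (pvRowOf classes tbl P p).1 = p.1 from rfl, if_neg hnotAct, pvRowOf, pvRowOf, if_neg hpc, if_neg hpc]

theorem pvFilterRemove (classes P rest' : List String) (x : String) (S : String → Int)
    (hsplit : classes = P ++ x :: rest') (hS : S x = 0) (hc1 : classes.count x = 1) :
    (PySem.List.remove? (classes.filter (fun c => !(decide (c ∈ P) && decide (S c = 0)))) x).getD
        (classes.filter (fun c => !(decide (c ∈ P) && decide (S c = 0))))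
      = classes.filter (fun c => !(decide (c ∈ P ++ [x]) && decide (S c = 0))) := by
  obtain ⟨hxP, -, -⟩ := pvCountOne classes P rest' x hsplit (le_of_eq hc1)
  have hx : x ∈ classes := by rw [hsplit]; simp
  have hxf : x ∈ classes.filter (fun c => !(decide (c ∈ P) && decide (S c = 0))) :=
    List.mem_filter.mpr ⟨hx, by simp [hxP]⟩
  rw [PySem.List.remove?_eq_some_erase _ x hxf, Option.getD_some,
    pvFilterErase _ _ _ (le_of_eq hc1)]
  exact List.filter_congr (fun c _ => (pvKeepAux_zero S P x hS c).symm)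

theorem pvStepA (classes : List String) (tbl : pvDictT)
    (hnd : tbl.keys.Nodup)
    (hKmem : ∀ r ∈ classes, r ∈ tbl.keys)
    (hD : ∀ x ∈ classes, 1 < classes.count x →
      pvRowSum classes tbl x ≠ 0 ∧ pvColSum classes tbl x ≠ 0)
    (P rest' : List String) (x : String) (hsplit : classes = P ++ x :: rest') :
    pvBodyA classes tbl
      (pvSpAt classes tbl P, classes.filter (pvKeepR classes tbl P), classes.filter (pvKeepC classes tbl P)) x
    = (pvSpAt classes tbl (P ++ [x]), classes.filter (pvKeepR classes tbl (P ++ [x])),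
       classes.filter (pvKeepC classes tbl (P ++ [x]))) := by
  have hx : x ∈ classes := by rw [hsplit]; simp
  have hsums := pvPairFold classes (fun y => (tbl.getD x PySem.Dict.empty).getD y 0)
      (fun y => (tbl.getD y PySem.Dict.empty).getD x 0) 0 0
  have hRSeq : (0 : Int) + (classes.map (fun y => (tbl.getD x PySem.Dict.empty).getD y 0)).sum
      = pvRowSum classes tbl x := by rw [zero_add]; rfl
  have hCSeq : (0 : Int) + (classes.map (fun y => (tbl.getD y PySem.Dict.empty).getD x 0)).sum
      = pvColSum classes tbl x := by rw [zero_add]; rfl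
  rw [hRSeq, hCSeq] at hsums
  have hcnt1R : pvRowSum classes tbl x = 0 → classes.count x = 1 := by
    intro hRS
    have h1 : 1 ≤ classes.count x := List.one_le_count_iff.mpr hx
    by_contra hne
    exact (hD x hx (by omega)).1 hRS
  have hcnt1C : pvColSum classes tbl x = 0 → classes.count x = 1 := by
    intro hCS
    have h1 : 1 ≤ classes.count x := List.one_le_count_iff.mpr hx
    by_contra hne
    exact (hD x hx (by omega)).2 hCS
  by_cases hRS : pvRowSum classes tbl x = 0 <;> by_cases hCS : pvColSum classes tbl x = 0 <;>
    simp only [pvBodyA, hsums, hRS, hCS, if_pos, not_false_iff, if_true, if_false, ite_true, ite_false, not_true]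
  case pos =>
    -- RS = 0, CS = 0
    have hremR := pvFilterRemove classes P rest' x (pvRowSum classes tbl) hsplit hRS (hcnt1R hRS)
    have hremC := pvFilterRemove classes P rest' x (pvColSum classes tbl) hsplit hCS (hcnt1C hCS)
    rw [show (PySem.List.remove? (List.filter (pvKeepR classes tbl P) classes) x).getD
        (List.filter (pvKeepR classes tbl P) classes)
        = List.filter (pvKeepR classes tbl (P ++ [x])) classes from hremR,
      show (PySem.List.remove? (List.filter (pvKeepC classes tbl P) classes) x).getD
        (List.filter (pvKeepC classes tbl P) classes)
        = List.filter (pvKeepC classes tbl (P ++ [x])) classes from hremC,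
      pvSpErase classes tbl P x hRS]
    exact congrArg (fun d => (d, List.filter (pvKeepR classes tbl (P ++ [x])) classes,
      List.filter (pvKeepC classes tbl (P ++ [x])) classes)) (pvColStep classes tbl hnd hKmem P x hCS)
  case neg =>
    -- RS = 0, CS ≠ 0
    have hremR := pvFilterRemove classes P rest' x (pvRowSum classes tbl) hsplit hRS (hcnt1R hRS)
    rw [show (PySem.List.remove? (List.filter (pvKeepR classes tbl P) classes) x).getD
        (List.filter (pvKeepR classes tbl P) classes)
        = List.filter (pvKeepR classes tbl (P ++ [x])) classes from hremR,
      pvSpErase classes tbl P x hRS]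
    simp only [pvSpAt]
    rw [pvRowOfNe classes tbl P x hCS, pvKeepCNe classes tbl P x hCS]
    rfl
  case pos =>
    -- RS ≠ 0, CS = 0
    have hremC := pvFilterRemove classes P rest' x (pvColSum classes tbl) hsplit hCS (hcnt1C hCS)
    rw [show (PySem.List.remove? (List.filter (pvKeepC classes tbl P) classes) x).getD
        (List.filter (pvKeepC classes tbl P) classes)
        = List.filter (pvKeepC classes tbl (P ++ [x])) classes from hremC,
      show pvSpAt classes tbl P = PySem.Dict.mk ((tbl.items.filter
          (fun p => pvKeepR classes tbl (P ++ [x]) p.1)).map (pvRowOf classes tbl P)) from by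
        rw [pvSpAt, pvKeepRNe classes tbl P x hRS],
      show List.filter (pvKeepR classes tbl P) classes
          = List.filter (pvKeepR classes tbl (P ++ [x])) classes from by
        rw [pvKeepRNe classes tbl P x hRS]]
    exact congrArg (fun d => (d, List.filter (pvKeepR classes tbl (P ++ [x])) classes,
      List.filter (pvKeepC classes tbl (P ++ [x])) classes)) (pvColStep classes tbl hnd hKmem P x hCS)
  case neg =>
    -- RS ≠ 0, CS ≠ 0
    rw [show pvSpAt classes tbl (P ++ [x]) = pvSpAt classes tbl P from by
        rw [pvSpAt, pvSpAt, pvKeepRNe classes tbl P x hRS, pvRowOfNe classes tbl P x hCS],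
      pvKeepRNe classes tbl P x hRS, pvKeepCNe classes tbl P x hCS]

theorem pvLoopA (classes : List String) (tbl : pvDictT)
    (hnd : tbl.keys.Nodup)
    (hKmem : ∀ r ∈ classes, r ∈ tbl.keys)
    (hD : ∀ x ∈ classes, 1 < classes.count x →
      pvRowSum classes tbl x ≠ 0 ∧ pvColSum classes tbl x ≠ 0) :
    ∀ (rest P : List String), classes = P ++ rest →
    rest.foldl (pvBodyA classes tbl)
      (pvSpAt classes tbl P, classes.filter (pvKeepR classes tbl P), classes.filter (pvKeepC classes tbl P))
    = (pvSpAt classes tbl classes, classes.filter (pvKeepR classes tbl classes),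
       classes.filter (pvKeepC classes tbl classes)) := by
  intro rest
  induction rest with
  | nil =>
    intro P hsplit
    rw [List.foldl_nil, show P = classes from by rw [hsplit, List.append_nil]]
  | cons x rest' ih =>
    intro P hsplit
    rw [List.foldl_cons, pvStepA classes tbl hnd hKmem hD P rest' x hsplit]
    exact ih (P ++ [x]) (by rw [hsplit, List.append_assoc]; rfl)

theorem pvFoldInsertCopy {ν : Type} (l : List (String × ν)) :
    ∀ (acc : List (String × ν)), (l.map (·.1)).Nodup →
    (∀ p ∈ l, p.1 ∉ acc.map (·.1)) →
    l.foldl (fun sp p => sp.insert p.1 p.2) (PySem.Dict.mk acc) = PySem.Dict.mk (acc ++ l) := by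
  induction l with
  | nil => intro acc _ _; simp
  | cons p t ih =>
    intro acc hnd hfresh
    rw [List.map_cons, List.nodup_cons] at hnd
    obtain ⟨hp1, hndt⟩ := hnd
    have hfresh' : ∀ q ∈ t, q.1 ∉ (acc ++ [p]).map (·.1) := by
      intro q hq
      simp only [List.map_append, List.mem_append, List.map_cons, List.map_nil, List.mem_cons,
        List.not_mem_nil, or_false]
      rintro (h | h)
      · exact hfresh q (List.mem_cons_of_mem _ hq) h
      · exact hp1 (h ▸ List.mem_map_of_mem (f := (·.1)) hq)
    have hcont : (PySem.Dict.mk acc).contains p.1 = false := by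
      rw [pvContainsMk]; simpa using hfresh p (by simp)
    rw [List.foldl_cons,
      show (PySem.Dict.mk acc).insert p.1 p.2 = PySem.Dict.mk (acc ++ [p]) from by
        apply PySem.Dict.ext; rw [PySem.Dict.items_insert_of_not_contains _ _ hcont],
      ih _ hndt hfresh']
    simp

theorem pvOfListMk {ν : Type} (l : List (String × ν)) (h : (l.map (·.1)).Nodup) :
    PySem.Dict.ofList l = PySem.Dict.mk l := by
  have := pvFoldInsertCopy l [] h (by simp)
  simpa [PySem.Dict.ofList, PySem.Dict.update] using this

theorem pvMkItems {κ ν : Type} (d : PySem.Dict κ ν) : PySem.Dict.mk d.items = d := rfl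

theorem pvSpAtNil (classes : List String) (tbl : pvDictT) : pvSpAt classes tbl [] = tbl := by
  rw [pvSpAt]
  have h1 : tbl.items.filter (fun p => pvKeepR classes tbl [] p.1) = tbl.items := by
    apply List.filter_eq_self.mpr
    intro p _
    simp [pvKeepR]
  rw [h1]
  have h2 : tbl.items.map (pvRowOf classes tbl []) = tbl.items := by
    conv_rhs => rw [← List.map_id tbl.items]
    apply List.map_congr_left
    intro p _
    rw [pvRowOf]
    have h3 : p.2.items.filter (fun q => pvKeepC classes tbl [] q.1) = p.2.items := by
      apply List.filter_eq_self.mpr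
      intro q _
      simp [pvKeepC]
    rw [h3, pvMkItems]
    simp
  rw [h2, pvMkItems]

theorem pvFilterNil (classes : List String) (tbl : pvDictT) :
    classes.filter (pvKeepR classes tbl []) = classes ∧
    classes.filter (pvKeepC classes tbl []) = classes := by
  constructor <;> (apply List.filter_eq_self.mpr; intro c _; simp [pvKeepR, pvKeepC])

theorem pvSetContains (l : List String) (c : String) :
    (PySem.Set.ofList l).contains c = decide (c ∈ l) := by
  by_cases h : c ∈ l
  · have hm : c ∈ PySem.Set.ofList l := (PySem.Set.mem_ofList _ _).mpr h
    simp [PySem.Set.contains, h, hm]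
  · have hm : c ∉ PySem.Set.ofList l := fun hc => h ((PySem.Set.mem_ofList _ _).mp hc)
    have hfalse : PySem.Set.contains (PySem.Set.ofList l) c = false := by
      cases hb : PySem.Set.contains (PySem.Set.ofList l) c
      · rfl
      · exact absurd (List.contains_iff_mem.mp hb) hm
    rw [hfalse, decide_eq_false h]

theorem pvZeroContains (classes : List String) (S : String → Int) (c : String) :
    (PySem.Set.ofList (classes.filter (fun x => S x == 0))).contains c
      = (decide (c ∈ classes) && decide (S c = 0)) := by
  rw [pvSetContains]
  by_cases h1 : c ∈ classes <;> by_cases h2 : S c = 0 <;>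
    simp [List.mem_filter, h1, h2]

theorem pvFoldInsertSkip {ν : Type} (l : List (String × ν)) (c : String × ν → Bool) (f : String × ν → ν) :
    ∀ (acc : List (String × ν)), (l.map (·.1)).Nodup →
    (∀ p ∈ l, p.1 ∉ acc.map (·.1)) →
    l.foldl (fun sp p => if c p then sp else sp.insert p.1 (f p)) (PySem.Dict.mk acc)
      = PySem.Dict.mk (acc ++ (l.filter (fun p => !c p)).map (fun p => (p.1, f p))) := by
  induction l with
  | nil => intro acc _ _; simp
  | cons p t ih =>
    intro acc hnd hfresh
    rw [List.map_cons, List.nodup_cons] at hnd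
    obtain ⟨hp1, hndt⟩ := hnd
    have hfresh' : ∀ q ∈ t, q.1 ∉ (acc ++ [(p.1, f p)]).map (·.1) := by
      intro q hq
      simp only [List.map_append, List.mem_append, List.map_cons, List.map_nil, List.mem_cons,
        List.not_mem_nil, or_false]
      rintro (h | h)
      · exact hfresh q (List.mem_cons_of_mem _ hq) h
      · exact hp1 (h ▸ List.mem_map_of_mem (f := (·.1)) hq)
    by_cases hc : c p = true
    · rw [List.foldl_cons, if_pos hc, ih acc hndt (fun q hq => hfresh q (List.mem_cons_of_mem _ hq))]
      simp [hc]
    · have hc' : c p = false := by simpa using hc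
      have hcont : (PySem.Dict.mk acc).contains p.1 = false := by
        rw [pvContainsMk]; simpa using hfresh p (by simp)
      rw [List.foldl_cons, if_neg (by simp [hc']),
        show (PySem.Dict.mk acc).insert p.1 (f p) = PySem.Dict.mk (acc ++ [(p.1, f p)]) from by
          apply PySem.Dict.ext; rw [PySem.Dict.items_insert_of_not_contains _ _ hcont],
        ih _ hndt hfresh']
      simp [hc']


theorem pvValuesFold {ν : Type} (l : List (String × ν)) :
    ∀ (d : PySem.Dict String ν), ∀ v ∈ (l.foldl (fun acc p => acc.insert p.1 p.2) d).values,
      v ∈ d.values ∨ ∃ q ∈ l, v = q.2 := by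
  induction l with
  | nil => intro d v hv; exact Or.inl hv
  | cons p t ih =>
    intro d v hv
    rcases ih _ v hv with h | ⟨q, hq, he⟩
    · rcases PySem.Dict.mem_values_insert d p.1 p.2 v h with h | h
      · exact Or.inr ⟨p, by simp, h⟩
      · exact Or.inl h
    · exact Or.inr ⟨q, List.mem_cons_of_mem _ hq, he⟩

theorem pvRowsNodup (table : List (String × List (String × Int))) :
    ∀ p ∈ (pvToDict table).items, p.2.keys.Nodup := by
  rw [pvToDict]
  intro p hp
  have hv : p.2 ∈ (PySem.Dict.ofList (table.map (fun p => (p.1, PySem.Dict.ofList p.2)))).values :=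
    List.mem_map_of_mem hp
  have := pvValuesFold _ PySem.Dict.empty p.2 (by
    simpa [PySem.Dict.ofList, PySem.Dict.update] using hv)
  rcases this with h | ⟨q, hq, he⟩
  · simp [PySem.Dict.empty, PySem.Dict.values] at h
  · rcases List.mem_map.mp hq with ⟨r, _, rfl⟩
    rw [he]
    exact PySem.Dict.nodup_keys_ofList _

-- ===== VERDICT (by name: the statement is the Claim_ definition above) =====
theorem sparse_matrix_calc_spec : Claim_equal_sparse_matrix_calc := by
  intro classes table _ hpre
  unfold Spec_sparse_matrix_calc
  obtain ⟨hK, hD⟩ := hpre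
  have hnd : (pvToDict table).keys.Nodup := by rw [pvToDict]; exact PySem.Dict.nodup_keys_ofList _
  have hKmem : ∀ r ∈ classes, r ∈ (pvToDict table).keys := by
    intro r hr
    have h := (hK r hr).1
    rw [PySem.Dict.contains_eq_decide_mem_keys] at h
    exact of_decide_eq_true h
  have hrows : ∀ p ∈ (pvToDict table).items, p.2.keys.Nodup := pvRowsNodup table
  simp only [sparse_matrix_calc, sparse_matrix_calc_alt]
  -- A side: initial copy loop is the table itself
  have hsp0 : (pvToDict table).items.foldl (fun sp p => sp.insert p.1 p.2) PySem.Dict.empty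
      = pvToDict table := by
    have h := pvFoldInsertCopy (pvToDict table).items [] hnd (by simp)
    rw [show PySem.Dict.empty = PySem.Dict.mk ([] : List (String × PySem.Dict String Int)) from rfl]
    rw [h, List.nil_append, pvMkItems]
  rw [hsp0]
  -- A side: main loop closed form
  have hloop := pvLoopA classes (pvToDict table) hnd hKmem hD classes [] rfl
  rw [pvSpAtNil, (pvFilterNil classes (pvToDict table)).1, (pvFilterNil classes (pvToDict table)).2] at hloop
  rw [hloop]
  -- B side: the build loop appends exactly the kept rows
  have hBsp := pvFoldInsertSkip (pvToDict table).items
    (fun p => (PySem.Set.ofList (classes.filter (fun x => pvRowSum classes (pvToDict table) x == 0))).contains p.1)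
    (fun p => if (PySem.Set.ofList classes).contains p.1
      then PySem.Dict.ofList (p.2.items.filter (fun q =>
        !(PySem.Set.ofList (classes.filter (fun x => pvColSum classes (pvToDict table) x == 0))).contains q.1))
      else p.2)
    [] hnd (by simp)
  rw [show PySem.Dict.empty = PySem.Dict.mk ([] : List (String × PySem.Dict String Int)) from rfl, hBsp,
    List.nil_append]
  -- identify B's pieces with the closed forms
  have hact : classes.filter (fun x =>
      !(PySem.Set.ofList (classes.filter (fun x => pvRowSum classes (pvToDict table) x == 0))).contains x)
      = classes.filter (pvKeepR classes (pvToDict table) classes) :=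
    List.filter_congr (fun c _ => by rw [pvZeroContains]; rfl)
  have hpred : classes.filter (fun x =>
      !(PySem.Set.ofList (classes.filter (fun x => pvColSum classes (pvToDict table) x == 0))).contains x)
      = classes.filter (pvKeepC classes (pvToDict table) classes) :=
    List.filter_congr (fun c _ => by rw [pvZeroContains]; rfl)
  have hspfilter : (pvToDict table).items.filter (fun p =>
      !(PySem.Set.ofList (classes.filter (fun x => pvRowSum classes (pvToDict table) x == 0))).contains p.1)
      = (pvToDict table).items.filter (fun p => pvKeepR classes (pvToDict table) classes p.1) :=
    List.filter_congr (fun p _ => by rw [pvZeroContains]; rfl)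
  have hspmap : ((pvToDict table).items.filter (fun p => pvKeepR classes (pvToDict table) classes p.1)).map
      (fun p => (p.1, if (PySem.Set.ofList classes).contains p.1
        then PySem.Dict.ofList (p.2.items.filter (fun q =>
          !(PySem.Set.ofList (classes.filter (fun x => pvColSum classes (pvToDict table) x == 0))).contains q.1))
        else p.2))
      = ((pvToDict table).items.filter (fun p => pvKeepR classes (pvToDict table) classes p.1)).map
        (pvRowOf classes (pvToDict table) classes) := by
    apply List.map_congr_left
    intro p hp
    have hpt : p ∈ (pvToDict table).items := List.mem_of_mem_filter hp
    have hfc : p.2.items.filter (fun q =>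
        !(PySem.Set.ofList (classes.filter (fun x => pvColSum classes (pvToDict table) x == 0))).contains q.1)
        = p.2.items.filter (fun q => pvKeepC classes (pvToDict table) classes q.1) :=
      List.filter_congr (fun q _ => by rw [pvZeroContains]; rfl)
    by_cases hpc : p.1 ∈ classes
    · rw [pvRowOf, if_pos hpc, pvSetContains, if_pos (decide_eq_true hpc), hfc,
        pvOfListMk _ (((List.filter_sublist).map _).nodup (hrows p hpt))]
    · rw [pvRowOf, if_neg hpc, pvSetContains, if_neg (by simp [hpc])]
  rw [hact, hpred, hspfilter, hspmap]
  rfl
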